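-- pv_equiv track=rewrite | github.com/Darwin4050E/PythonExercises | solutions/python/dominoes/2/dominoes.py | can_chain
-- ===== SOURCE A (Python) =====
-- from collections import defaultdict
--
-- def can_chain(dominoes):
--     """Order a given set of domino stones so that they form a correct domino chain.
--
--        In the chain, the dots on one half of a stone must match the dots on the neighboring
--        half of an adjacent stone. dditionally, the dots on the halves of the stones without
--        neighbors (the first and last stone) must match each other.
--
--     :param dominoes: list[tuple] - dominoes set.
--     :return: list[tuple] or None - chain of dominoes if it is possible. Otherwise, None.
--     """
--     if not dominoes:
--         return []
--     graph = defaultdict(list)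
--     counts = defaultdict(int)
--     for l_num, r_num in dominoes:
--         graph[l_num].append(r_num)
--         graph[r_num].append(l_num)
--         counts[l_num] += 1
--         counts[r_num] += 1
--     if any(count % 2 != 0 for count in counts.values()):
--         return None
--     start_node = dominoes[0][0]
--     stack = [start_node]
--     path = []
--     while stack:
--         node = stack[-1]
--         if graph[node]:
--             neighbor = graph[node].pop()
--             graph[neighbor].remove(node)
--             stack.append(neighbor)
--         else:
--             path.append(stack.pop())
--     if len(path) - 1 != len(dominoes) or path[0] != path[-1]:
--         return None
--     return [(path[index], path[index+1]) for index in range(len(path) - 1)]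
-- ===== SOURCE B (Python) =====
-- def can_chain(dominoes):
--     """Order a given set of domino stones so that they form a correct domino chain.
--
--     Tour-splicing Hierholzer instead of the per-edge stack machine: a helper
--     extracts one maximal greedy closed walk at a time, and the main loop scans
--     the circuit backwards, splicing each extracted detour in at the scan
--     position; the chain is the reversed circuit.  Reverse half-edges are
--     deleted lazily via per-(node,value) live/pending counters, so no linear
--     list.remove scan is needed.
--     """
--     if not dominoes:
--         return []
--     adj = {}
--     cnt = {}
--     deg = {}
--     for l, r in dominoes:
--         adj.setdefault(l, []).append(r)
--         adj.setdefault(r, []).append(l)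
--         cnt[(l, r)] = cnt.get((l, r), 0) + 1
--         cnt[(r, l)] = cnt.get((r, l), 0) + 1
--         deg[l] = deg.get(l, 0) + 1
--         deg[r] = deg.get(r, 0) + 1
--     if any(d % 2 for d in deg.values()):
--         return None
--     pend = {}
--
--     def walk(u):
--         # maximal greedy walk from u: repeatedly take the last live neighbour
--         # (skipping lazily-deleted copies), until u has no live neighbour left
--         w = [u]
--         while True:
--             lst = adj[u]
--             nb = None
--             while lst:
--                 x = lst[-1]
--                 c = cnt[(u, x)]
--                 p = pend.get((u, x), 0)
--                 lst.pop()
--                 cnt[(u, x)] = c - 1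
--                 if p >= c:
--                     pend[(u, x)] = p - 1  # a lazily deleted copy, skip it
--                 else:
--                     nb = x
--                     break
--             if nb is None:
--                 return w
--             pend[(nb, u)] = pend.get((nb, u), 0) + 1  # lazy reverse deletion
--             w.append(nb)
--             u = nb
--
--     circuit = walk(dominoes[0][0])
--     i = len(circuit) - 1
--     while i >= 0:
--         d = walk(circuit[i])
--         if len(d) > 1:
--             circuit[i + 1:i + 1] = d[1:]  # splice the detour in after position i
--             i += len(d) - 1
--         else:
--             i -= 1
--     path = circuit[::-1]
--     if len(path) - 1 != len(dominoes) or path[0] != path[-1]: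
--         return None
--     return list(zip(path, path[1:]))
-- ===== Notes on version B (the rewrite author's own statement) =====
-- stated objective: alternative
-- what changed: Replaced A's per-edge stack machine (push one neighbour per iteration, pop to path, linear graph[neighbor].remove scan) by tour-splicing Hierholzer: a walk() helper extracts one maximal greedy closed walk at a time, the main loop scans the circuit backwards splicing each extracted detour in at the scan position, the chain is the reversed circuit, and reverse half-edges are deleted lazily via per-(node,value) live/pending counters instead of list.remove.
import Mathlib
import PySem

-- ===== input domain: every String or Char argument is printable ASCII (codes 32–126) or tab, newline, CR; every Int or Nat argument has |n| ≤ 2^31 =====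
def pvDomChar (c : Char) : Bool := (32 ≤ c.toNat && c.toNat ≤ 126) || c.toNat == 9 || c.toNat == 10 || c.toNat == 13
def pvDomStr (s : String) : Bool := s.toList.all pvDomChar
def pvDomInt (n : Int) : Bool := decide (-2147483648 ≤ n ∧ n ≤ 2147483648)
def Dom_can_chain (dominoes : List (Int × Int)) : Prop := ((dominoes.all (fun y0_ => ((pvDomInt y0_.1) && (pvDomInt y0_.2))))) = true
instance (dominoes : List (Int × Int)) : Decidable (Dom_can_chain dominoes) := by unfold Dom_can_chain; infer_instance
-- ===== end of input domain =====

-- B replaces A's per-edge stack machine by tour-splicing Hierholzer (extract a maximal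
-- greedy closed walk, splice it into the circuit at the scan position, reverse at the end)
-- with lazy counter-based deletion of reverse half-edges; same chain, different structure.

-- ===== PORT A =====
-- `list.remove(x)` raises ValueError when x is absent; that is unreachable here
-- (the adjacency multiset stays symmetric), so the total form keeps the list unchanged.
def pvRemove (l : List Int) (x : Int) : List Int := (PySem.List.remove? l x).getD l

-- the build loop: graph[l].append(r); graph[r].append(l); counts[l]+=1; counts[r]+=1
def aBuild (ds : List (Int × Int)) (g : PySem.Dict Int (List Int)) (c : PySem.Dict Int Int) :
    PySem.Dict Int (List Int) × PySem.Dict Int Int :=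
  match ds with
  | [] => (g, c)
  | (l, r) :: rest =>
      let g1 := g.insert l (g.getD l [] ++ [r])
      let g2 := g1.insert r (g1.getD r [] ++ [l])
      let c1 := c.insert l (c.getD l 0 + 1)
      let c2 := c1.insert r (c1.getD r 0 + 1)
      aBuild rest g2 c2

-- the while loop, returning `path`; fuel 2*len(dominoes)+1 (one unit per iteration)
-- always suffices, since each iteration removes an adjacency entry or pops the stack
def aLoop (fuel : Nat) (g : PySem.Dict Int (List Int)) (stack path : List Int) : List Int :=
  match fuel, stack with
  | 0, _ => path
  | _ + 1, [] => path
  | Nat.succ fuel', node :: rest =>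
      let adj := g.getD node []
      match adj.getLast? with
      | some neighbor =>
          let g1 := g.insert node adj.dropLast
          let g2 := g1.insert neighbor (pvRemove (g1.getD neighbor []) node)
          aLoop fuel' g2 (neighbor :: node :: rest) path
      | none => aLoop fuel' g rest (path ++ [node])

def can_chain (dominoes : List (Int × Int)) : Option (List (Int × Int)) :=
  if dominoes = [] then some [] else
  let gc := aBuild dominoes PySem.Dict.empty PySem.Dict.empty
  if gc.2.values.any (fun c => PySem.Int.mod c 2 != 0) then none
  else
    let start := (dominoes.headD (0, 0)).1   -- dominoes[0][0]; the list is nonempty here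
    let path := aLoop (2 * dominoes.length + 1) gc.1 [start] []
    if ((path.length : Int) - 1 ≠ (dominoes.length : Int)) ∨
        (PySem.List.pyGetD path 0 0 ≠ PySem.List.pyGetD path (-1) 0) then none
    else some ((PySem.List.pyRange 0 ((path.length : Int) - 1) 1).map
        (fun i => (PySem.List.pyGetD path i 0, PySem.List.pyGetD path (i + 1) 0)))

-- ===== PORT B =====
-- the build loop of Source B: adjacency lists, per-(node,value) live counters, degrees
def bBuild (ds : List (Int × Int)) (adj : PySem.Dict Int (List Int))
    (cnt : PySem.Dict (Int × Int) Int) (deg : PySem.Dict Int Int) :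
    PySem.Dict Int (List Int) × PySem.Dict (Int × Int) Int × PySem.Dict Int Int :=
  match ds with
  | [] => (adj, cnt, deg)
  | (l, r) :: rest =>
      let a1 := adj.insert l (adj.getD l [] ++ [r])
      let a2 := a1.insert r (a1.getD r [] ++ [l])
      let c1 := cnt.insert (l, r) (cnt.getD (l, r) 0 + 1)
      let c2 := c1.insert (r, l) (c1.getD (r, l) 0 + 1)
      let d1 := deg.insert l (deg.getD l 0 + 1)
      let d2 := d1.insert r (d1.getD r 0 + 1)
      bBuild rest a2 c2 d2

-- the inner `while lst:` loop of walk(): pop lazily deleted copies from the end,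
-- return the first live neighbour (or none when the list runs out)
def bPop (node : Int) (lst : List Int) (cnt pend : PySem.Dict (Int × Int) Int) :
    Option Int × List Int × PySem.Dict (Int × Int) Int × PySem.Dict (Int × Int) Int :=
  match h : lst.getLast? with
  | none => (none, lst, cnt, pend)
  | some w =>
      let c := cnt.getD (node, w) 0
      let p := pend.getD (node, w) 0
      let cnt' := cnt.insert (node, w) (c - 1)
      if p ≥ c then bPop node lst.dropLast cnt' (pend.insert (node, w) (p - 1))
      else (some w, lst.dropLast, cnt', pend)
termination_by lst.length
decreasing_by
  have hne : lst ≠ [] := by intro hn; rw [hn] at h; simp at h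
  have := List.length_pos_iff.mpr hne
  simp [List.length_dropLast]; omega

-- walk(u) of Source B: maximal greedy walk; one fuel unit per edge taken; returns the
-- walk, the remaining fuel and the mutated state (fuel exhaustion is unreachable
-- at the fuel passed by can_chain_alt)
def bWalk (fuel : Nat) (adj : PySem.Dict Int (List Int)) (cnt pend : PySem.Dict (Int × Int) Int)
    (u : Int) :
    List Int × Nat × PySem.Dict Int (List Int) × PySem.Dict (Int × Int) Int × PySem.Dict (Int × Int) Int :=
  match bPop u (adj.getD u []) cnt pend with
  | (none, l', cnt', pend') => ([u], fuel, adj.insert u l', cnt', pend')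
  | (some v, l', cnt', pend') =>
      match fuel with
      | 0 => ([u], 0, adj.insert u l', cnt', pend')   -- fuel exhausted (unreachable)
      | Nat.succ f =>
          let st := bWalk f (adj.insert u l') cnt'
            (pend'.insert (v, u) (pend'.getD (v, u) 0 + 1)) v
          (u :: st.1, st.2)

theorem bWalk_fuel_le (fuel : Nat) (adj : PySem.Dict Int (List Int))
    (cnt pend : PySem.Dict (Int × Int) Int) (u : Int) :
    (bWalk fuel adj cnt pend u).2.1 ≤ fuel := by
  induction fuel generalizing adj cnt pend u with
  | zero =>
      rw [bWalk]
      rcases hp : bPop u (adj.getD u []) cnt pend with ⟨r, l', c', p'⟩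
      cases r <;> simp
  | succ f ih =>
      rw [bWalk]
      rcases hp : bPop u (adj.getD u []) cnt pend with ⟨r, l', c', p'⟩
      cases r with
      | none => simp
      | some v =>
          simp only
          exact le_trans (ih _ _ _ _) (Nat.le_succ f)

theorem bWalk_fuel_lt (fuel : Nat) (adj : PySem.Dict Int (List Int))
    (cnt pend : PySem.Dict (Int × Int) Int) (u : Int)
    (h : 1 < (bWalk fuel adj cnt pend u).1.length) :
    (bWalk fuel adj cnt pend u).2.1 < fuel := by
  rw [bWalk] at h ⊢
  rcases hp : bPop u (adj.getD u []) cnt pend with ⟨r, l', c', p'⟩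
  rw [hp] at h
  cases r with
  | none => simp at h
  | some v =>
      cases fuel with
      | zero => simp at h
      | succ f =>
          simp only
          exact Nat.lt_succ_of_le (bWalk_fuel_le _ _ _ _ _)

-- the outer `while i >= 0:` loop of Source B: extract a detour at the scan position,
-- splice it in (circuit[i+1:i+1] = d[1:]) or move the scan pointer left
def bOuter (fuel : Nat) (adj : PySem.Dict Int (List Int)) (cnt pend : PySem.Dict (Int × Int) Int)
    (circuit : List Int) (i : Int) : List Int :=
  if i < 0 then circuit else
  let u := PySem.List.pyGetD circuit i 0
  let w := bWalk fuel adj cnt pend u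
  if h : 1 < w.1.length then
    bOuter w.2.1 w.2.2.1 w.2.2.2.1 w.2.2.2.2
      (circuit.take (i + 1).toNat ++ w.1.tail ++ circuit.drop (i + 1).toNat)
      (i + w.1.length - 1)
  else if hz : w.2.1 = 0 then
    circuit.drop (i + 1).toNat   -- fuel exhausted (unreachable)
  else
    bOuter (w.2.1 - 1) w.2.2.1 w.2.2.2.1 w.2.2.2.2 circuit (i - 1)
termination_by fuel
decreasing_by
  · exact bWalk_fuel_lt _ _ _ _ _ h
  · show (bWalk fuel adj cnt pend (PySem.List.pyGetD circuit i 0)).2.1 - 1 < fuel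
    have hz' : (bWalk fuel adj cnt pend (PySem.List.pyGetD circuit i 0)).2.1 ≠ 0 := hz
    have := bWalk_fuel_le fuel adj cnt pend (PySem.List.pyGetD circuit i 0)
    omega

def can_chain_alt (dominoes : List (Int × Int)) : Option (List (Int × Int)) :=
  if dominoes = [] then some [] else
  let acd := bBuild dominoes PySem.Dict.empty PySem.Dict.empty PySem.Dict.empty
  if acd.2.2.values.any (fun d => PySem.Int.mod d 2 != 0) then none
  else
    let w := bWalk (2 * dominoes.length + 1) acd.1 acd.2.1 PySem.Dict.empty
      (dominoes.headD (0, 0)).1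
    let circuit := bOuter w.2.1 w.2.2.1 w.2.2.2.1 w.2.2.2.2 w.1 ((w.1.length : Int) - 1)
    let path := circuit.reverse
    if ((path.length : Int) - 1 ≠ (dominoes.length : Int)) ∨
        (PySem.List.pyGetD path 0 0 ≠ PySem.List.pyGetD path (-1) 0) then none
    else some (path.zip (PySem.List.slice path (some 1) none))

-- ===== PRECONDITION & SPEC =====
def Spec_can_chain (dominoes : List (Int × Int)) (out : Option (List (Int × Int))) : Prop := out = can_chain_alt dominoes
instance (dominoes : List (Int × Int)) (out : Option (List (Int × Int))) : Decidable (Spec_can_chain dominoes out) := by unfold Spec_can_chain; infer_instance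

-- ===== CLAIM (what is proved, stated in full; the proofs are below) =====
def Claim_equal_can_chain : Prop := ∀ (dominoes : List (Int × Int)), Dom_can_chain dominoes → Spec_can_chain dominoes (can_chain dominoes)

-- ===== LEMMAS AND PROOFS =====

-- proof-layer intermediate: A's stack machine re-expressed over B's lazy-counter
-- state (one bPop per step); it bridges aLoop and the bWalk/bOuter decomposition
def bLoop (fuel : Nat) (adj : PySem.Dict Int (List Int)) (cnt pend : PySem.Dict (Int × Int) Int)
    (stack path : List Int) : List Int :=
  match fuel, stack with
  | 0, _ => path
  | _ + 1, [] => path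
  | Nat.succ fuel', node :: rest =>
      match bPop node (adj.getD node []) cnt pend with
      | (some nb, l', cnt', pend') =>
          bLoop fuel' (adj.insert node l') cnt'
            (pend'.insert (nb, node) (pend'.getD (nb, node) 0 + 1)) (nb :: node :: rest) path
      | (none, l', cnt', pend') =>
          bLoop fuel' (adj.insert node l') cnt' pend' rest (path ++ [node])

-- `tlF p l` is the "true" adjacency list represented by lazy list `l` with pending
-- first-occurrence deletion counts `p`: the first (p w) occurrences of each value w are gone.
def tlF (p : Int → Int) : List Int → List Int
  | [] => []
  | w :: ws => if p w > 0 then tlF (fun v => if v = w then p w - 1 else p v) ws else w :: tlF p ws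

def pendF (pend : PySem.Dict (Int × Int) Int) (x : Int) : Int → Int := fun w => pend.getD (x, w) 0

theorem tlF_congr (l : List Int) : ∀ (p p' : Int → Int), (∀ w, p w = p' w) → tlF p l = tlF p' l := by
  induction l with
  | nil => intro p p' h; rfl
  | cons w ws ih =>
    intro p p' h
    simp only [tlF, h w]
    split_ifs with hgt
    · exact ih _ _ (fun v => by by_cases hv : v = w <;> simp [hv, h])
    · rw [ih p p' h]

theorem tlF_zero (l : List Int) : ∀ (p : Int → Int), (∀ w, p w ≤ 0) → tlF p l = l := by
  induction l with
  | nil => intro p _; rfl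
  | cons w ws ih =>
    intro p h
    simp only [tlF]
    rw [if_neg (by have := h w; omega), ih p h]

theorem tlF_append (l : List Int) : ∀ (p : Int → Int) (w : Int), (∀ v, 0 ≤ p v) →
    tlF p (l ++ [w]) = tlF p l ++ (if p w ≥ (l.count w : Int) + 1 then [] else [w]) := by
  induction l with
  | nil =>
    intro p w _
    simp only [List.nil_append, tlF, List.count_nil]
    split_ifs with h1 h2 h2 <;> first | rfl | omega
  | cons u us ih =>
    intro p w hp
    simp only [List.cons_append, tlF]
    by_cases hu : p u > 0
    · rw [if_pos hu, if_pos hu,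
        ih _ w (fun v => by by_cases hv : v = u <;> simp [hv] <;> [omega; exact hp v])]
      have hiff : ((fun v => if v = u then p u - 1 else p v) w ≥ (us.count w : Int) + 1)
          ↔ (p w ≥ (((u :: us).count w : Int)) + 1) := by
        by_cases hw : w = u <;> simp [hw, List.count_cons] <;> push_cast <;> omega
      rw [if_congr hiff rfl rfl]
    · rw [if_neg hu, if_neg hu, ih p w hp]
      have hiff : (p w ≥ ((us.count w : Int)) + 1) ↔ (p w ≥ (((u :: us).count w : Int)) + 1) := by
        by_cases hw : w = u
        · have h1 := hp w; subst hw; simp [List.count_cons]; omega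
        · simp [List.count_cons, Ne.symm hw]
      rw [if_congr hiff rfl rfl, List.cons_append]

theorem tlF_dec (l : List Int) : ∀ (p : Int → Int) (w : Int), (∀ v, 0 ≤ p v) →
    (l.count w : Int) < p w →
    tlF (fun v => if v = w then p w - 1 else p v) l = tlF p l := by
  induction l with
  | nil => intro p w _ _; rfl
  | cons u us ih =>
    intro p w hp hlt
    by_cases hu : u = w
    · subst hu
      rw [List.count_cons_self] at hlt
      push_cast at hlt
      have h0 : (0:Int) ≤ (us.count u : Int) := by positivity
      simp only [tlF, eq_self_iff_true, ite_true]
      rw [if_pos (show p u - 1 > 0 by omega), if_pos (show p u > 0 by omega)]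
      refine Eq.trans (tlF_congr us _ _ ?_)
        (ih (fun v => if v = u then p u - 1 else p v) u
          (fun v => by by_cases hv : v = u <;> simp [hv] <;> [omega; exact hp v])
          (by simp; omega))
      intro v
      by_cases hv : v = u <;> simp [hv]
    · have hlt' : (us.count w : Int) < p w := by
        simpa [List.count_cons, hu] using hlt
      simp only [tlF, if_neg hu]
      by_cases hpu : p u > 0
      · rw [if_pos hpu, if_pos hpu]
        refine Eq.trans (tlF_congr us _ _ ?_)
          (ih (fun v => if v = u then p u - 1 else p v) w
            (fun v => by by_cases hv : v = u <;> simp [hv] <;> [omega; exact hp v])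
            (by simp [Ne.symm hu]; omega))
        intro v
        by_cases hv : v = u
        · simp [hv, hu]
        · by_cases hw : v = w <;> simp [hv, hw, Ne.symm hu]
      · rw [if_neg hpu, if_neg hpu, ih p w hp hlt']

theorem pvRemove_cons_of_ne (t : List Int) (x v : Int) (h : x ≠ v) :
    pvRemove (x :: t) v = x :: pvRemove t v := by
  unfold pvRemove
  rw [PySem.List.remove?_cons_of_ne t h]
  cases hr : PySem.List.remove? t v <;> simp [hr]

theorem pvRemove_tlF (l : List Int) : ∀ (p : Int → Int) (v : Int), (∀ w, 0 ≤ p w) →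
    pvRemove (tlF p l) v = tlF (fun w => if w = v then p v + 1 else p w) l := by
  induction l with
  | nil => intro p v _; rfl
  | cons w ws ih =>
    intro p v hp
    by_cases hw : (0:Int) < p w
    · -- head is lazily deleted on both sides
      have h1 : (if w = v then p v + 1 else p w) > 0 := by
        have := hp v; split_ifs with h <;> [omega; omega]
      simp only [tlF]
      rw [if_pos hw, if_pos h1,
        ih _ v (fun u => by split_ifs <;> [omega; exact hp u])]
      refine tlF_congr ws _ _ (fun u => ?_)
      dsimp only
      split_ifs <;> subst_vars <;> omega
    · -- head is live
      have hw0 : p w = 0 := le_antisymm (by omega) (hp w)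
      simp only [tlF]
      rw [if_neg (by omega)]
      by_cases hwv : w = v
      · subst hwv
        rw [if_pos (by split_ifs with h <;> [(have := hp w; omega); exact absurd rfl h])]
        unfold pvRemove
        rw [PySem.List.remove?_cons_self]
        simp only [Option.getD_some]
        refine tlF_congr ws _ _ (fun u => ?_)
        dsimp only
        split_ifs <;> subst_vars <;> omega
      · rw [if_neg (by rw [if_neg hwv]; omega),
          pvRemove_cons_of_ne _ _ _ hwv, ih p v hp]

theorem bPop_nil (node : Int) (cnt pend : PySem.Dict (Int × Int) Int) :
    bPop node [] cnt pend = (none, [], cnt, pend) := by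
  rw [bPop]; rfl

theorem bPop_concat (node : Int) (l : List Int) (w : Int) (cnt pend : PySem.Dict (Int × Int) Int) :
    bPop node (l ++ [w]) cnt pend =
      (if pend.getD (node, w) 0 ≥ cnt.getD (node, w) 0 then
        bPop node l (cnt.insert (node, w) (cnt.getD (node, w) 0 - 1))
          (pend.insert (node, w) (pend.getD (node, w) 0 - 1))
       else (some w, l, cnt.insert (node, w) (cnt.getD (node, w) 0 - 1), pend)) := by
  rw [bPop]
  split
  · next h => simp at h
  · next w1 h =>
      rw [List.getLast?_concat] at h
      cases h
      simp

theorem bPop_none_nil (node : Int) (lst : List Int) :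
    ∀ (cnt pend : PySem.Dict (Int × Int) Int),
    (bPop node lst cnt pend).1 = none → (bPop node lst cnt pend).2.1 = [] := by
  induction lst using List.reverseRecOn with
  | nil => intro cnt pend _; rw [bPop_nil]
  | append_singleton l w ihl =>
    intro cnt pend h
    rw [bPop_concat] at h ⊢
    by_cases hc : pend.getD (node, w) 0 ≥ cnt.getD (node, w) 0
    · rw [if_pos hc] at h ⊢
      exact ihl _ _ h
    · rw [if_neg hc] at h
      simp at h

theorem bPop_spec (node : Int) (lst : List Int) :
    ∀ (cnt pend : PySem.Dict (Int × Int) Int),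
    (∀ w, cnt.getD (node, w) 0 = (lst.count w : Int)) →
    (∀ w, 0 ≤ pend.getD (node, w) 0) →
    (bPop node lst cnt pend).1 = (tlF (pendF pend node) lst).getLast? ∧
    tlF (pendF (bPop node lst cnt pend).2.2.2 node) (bPop node lst cnt pend).2.1
      = (tlF (pendF pend node) lst).dropLast ∧
    (∀ w, (bPop node lst cnt pend).2.2.1.getD (node, w) 0
      = ((bPop node lst cnt pend).2.1.count w : Int)) ∧
    (∀ k : Int × Int, k.1 ≠ node → (bPop node lst cnt pend).2.2.1.getD k 0 = cnt.getD k 0) ∧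
    (∀ k : Int × Int, k.1 ≠ node → (bPop node lst cnt pend).2.2.2.getD k 0 = pend.getD k 0) ∧
    (∀ w, 0 ≤ (bPop node lst cnt pend).2.2.2.getD (node, w) 0) := by
  induction lst using List.reverseRecOn with
  | nil =>
    intro cnt pend hc hp
    rw [bPop_nil]
    exact ⟨rfl, rfl, fun w => by simpa using hc w, fun k _ => rfl, fun k _ => rfl, hp⟩
  | append_singleton l w ihl =>
    intro cnt pend hc hp
    have hcl : ((l ++ [w]).count w) = l.count w + 1 := by simp
    have hcw : cnt.getD (node, w) 0 = (l.count w : Int) + 1 := by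
      rw [hc w, hcl]; push_cast; ring
    have h0 : (0:Int) ≤ (l.count w : Int) := by positivity
    rw [bPop_concat]
    by_cases hpc : pend.getD (node, w) 0 ≥ cnt.getD (node, w) 0
    · rw [if_pos hpc]
      have hc' : ∀ u, (cnt.insert (node, w) (cnt.getD (node, w) 0 - 1)).getD (node, u) 0
          = (l.count u : Int) := by
        intro u
        rw [PySem.Dict.getD_insert]
        split_ifs with h
        · injection h with h1 h2; subst h2; omega
        · have hne : u ≠ w := fun e => h (by rw [e])
          rw [hc u]
          have : (l ++ [w]).count u = l.count u := by simp [List.count_append, List.count_singleton, hne, Ne.symm hne]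
          rw [this]
      have hp' : ∀ u, 0 ≤ (pend.insert (node, w) (pend.getD (node, w) 0 - 1)).getD (node, u) 0 := by
        intro u
        rw [PySem.Dict.getD_insert]
        split_ifs with h
        · omega
        · exact hp u
      obtain ⟨ih1, ih2, ih3, ih4, ih5, ih6⟩ := ihl _ _ hc' hp'
      have hTL2 : tlF (pendF (pend.insert (node, w) (pend.getD (node, w) 0 - 1)) node) l
          = tlF (pendF pend node) l := by
        refine Eq.trans (tlF_congr l _ _ ?_) (tlF_dec l (pendF pend node) w hp (by unfold pendF; omega))
        intro u
        unfold pendF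
        rw [PySem.Dict.getD_insert]
        by_cases h : u = w
        · subst h; rw [if_pos rfl, if_pos rfl]
        · rw [if_neg (by simp [h]), if_neg h]
      have hTL : tlF (pendF pend node) (l ++ [w]) = tlF (pendF pend node) l := by
        rw [tlF_append l (pendF pend node) w hp, if_pos (by unfold pendF; omega)]
        simp
      refine ⟨?_, ?_, ih3, ?_, ?_, ih6⟩
      · rw [ih1, hTL2, hTL]
      · rw [ih2, hTL2, hTL]
      · intro k hk
        rw [ih4 k hk, PySem.Dict.getD_insert,
          if_neg (fun e => hk (by rw [e]))]
      · intro k hk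
        rw [ih5 k hk, PySem.Dict.getD_insert,
          if_neg (fun e => hk (by rw [e]))]
    · rw [if_neg hpc]
      dsimp only
      have hsurv : tlF (pendF pend node) (l ++ [w])
          = tlF (pendF pend node) l ++ [w] := by
        rw [tlF_append l (pendF pend node) w hp, if_neg (by unfold pendF; omega)]
      refine ⟨?_, ?_, ?_, ?_, fun k _ => rfl, hp⟩
      · rw [hsurv, List.getLast?_concat]
      · rw [hsurv, List.dropLast_concat]
      · intro u
        rw [PySem.Dict.getD_insert]
        split_ifs with h
        · injection h with h1 h2; subst h2; omega
        · have hne : u ≠ w := fun e => h (by rw [e])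
          rw [hc u]
          have : (l ++ [w]).count u = l.count u := by simp [List.count_append, List.count_singleton, hne, Ne.symm hne]
          rw [this]
      · intro k hk
        rw [PySem.Dict.getD_insert, if_neg (fun e => hk (by rw [e]))]

theorem loop_eq (fuel : Nat) :
    ∀ (g adj : PySem.Dict Int (List Int)) (cnt pend : PySem.Dict (Int × Int) Int)
      (stack path : List Int),
    (∀ x, g.getD x [] = tlF (pendF pend x) (adj.getD x [])) →
    (∀ x u, cnt.getD (x, u) 0 = ((adj.getD x []).count u : Int)) →
    (∀ k : Int × Int, 0 ≤ pend.getD k 0) →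
    aLoop fuel g stack path = bLoop fuel adj cnt pend stack path := by
  induction fuel with
  | zero => intro g adj cnt pend stack path _ _ _; rfl
  | succ fuel ih =>
    intro g adj cnt pend stack path hg hc hp
    cases stack with
    | nil => rfl
    | cons node rest =>
      obtain ⟨s1, s2, s3, s4, s5, s6⟩ := bPop_spec node (adj.getD node []) cnt pend
        (fun u => hc node u) (fun u => hp (node, u))
      rcases hres : bPop node (adj.getD node []) cnt pend with ⟨r, l', cnt', pend'⟩
      rw [hres] at s1 s2 s3 s4 s5 s6
      dsimp only at s1 s2 s3 s4 s5 s6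
      have hp' : ∀ k : Int × Int, 0 ≤ pend'.getD k 0 := by
        rintro ⟨a, b⟩
        by_cases ha : a = node
        · subst ha; exact s6 b
        · rw [s5 (a, b) ha]; exact hp (a, b)
      simp only [aLoop, bLoop, hres]
      rw [hg node, ← s1]
      cases r with
      | none =>
        refine ih g (adj.insert node l') cnt' pend' rest (path ++ [node]) ?_ ?_ hp'
        · intro x
          by_cases hx : x = node
          · subst hx
            have hTLnil : tlF (pendF pend x) (adj.getD x []) = [] :=
              List.getLast?_eq_none_iff.mp s1.symm
            rw [hg x, hTLnil, PySem.Dict.getD_insert_self, s2, hTLnil]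
            rfl
          · rw [PySem.Dict.getD_insert, if_neg hx, hg x]
            exact tlF_congr _ _ _ (fun u => (s5 (x, u) hx).symm)
        · intro x u
          by_cases hx : x = node
          · subst hx; rw [PySem.Dict.getD_insert_self]; exact s3 u
          · rw [PySem.Dict.getD_insert, if_neg hx, s4 (x, u) hx]; exact hc x u
      | some nb =>
        refine ih _ _ cnt' _ (nb :: node :: rest) path ?_ ?_ ?_
        · intro x
          by_cases hxnb : x = nb
          · subst hxnb
            rw [PySem.Dict.getD_insert_self]
            have hbase : ((g.insert node (tlF (pendF pend node) (adj.getD node [])).dropLast).getD x [])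
                = tlF (pendF pend' x) ((adj.insert node l').getD x []) := by
              by_cases hnn : x = node
              · subst hnn
                rw [PySem.Dict.getD_insert_self, PySem.Dict.getD_insert_self]
                exact s2.symm
              · rw [PySem.Dict.getD_insert, if_neg hnn, PySem.Dict.getD_insert, if_neg hnn, hg x]
                exact tlF_congr _ _ _ (fun u => (s5 (x, u) hnn).symm)
            rw [hbase, pvRemove_tlF _ (pendF pend' x) node (fun u => hp' (x, u))]
            refine tlF_congr _ _ _ (fun u => ?_)
            unfold pendF
            rw [PySem.Dict.getD_insert]
            by_cases h : u = node
            · subst h; rw [if_pos rfl, if_pos rfl]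
            · rw [if_neg h, if_neg (show ¬((x, u) = (x, node)) by simp [h])]
          · rw [PySem.Dict.getD_insert, if_neg hxnb]
            have hpF : pendF (pend'.insert (nb, node) (pend'.getD (nb, node) 0 + 1)) x
                = pendF pend' x := by
              funext u
              unfold pendF
              rw [PySem.Dict.getD_insert, if_neg (by simp [hxnb])]
            rw [hpF]
            by_cases hxn : x = node
            · subst hxn
              rw [PySem.Dict.getD_insert_self, PySem.Dict.getD_insert_self]
              exact s2.symm
            · rw [PySem.Dict.getD_insert, if_neg hxn, PySem.Dict.getD_insert, if_neg hxn, hg x]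
              exact tlF_congr _ _ _ (fun u => (s5 (x, u) hxn).symm)
        · intro x u
          by_cases hx : x = node
          · subst hx; rw [PySem.Dict.getD_insert_self]; exact s3 u
          · rw [PySem.Dict.getD_insert, if_neg hx, s4 (x, u) hx]; exact hc x u
        · rintro ⟨a, b⟩
          rw [PySem.Dict.getD_insert]
          split_ifs with h
          · have := hp' (nb, node); omega
          · exact hp' (a, b)

theorem build_eq (ds : List (Int × Int)) :
    ∀ (g : PySem.Dict Int (List Int)) (c : PySem.Dict Int Int) (cnt : PySem.Dict (Int × Int) Int),
    aBuild ds g c = ((bBuild ds g cnt c).1, (bBuild ds g cnt c).2.2) := by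
  induction ds with
  | nil => intro g c cnt; rfl
  | cons d rest ih =>
    rcases d with ⟨l, r⟩
    intro g c cnt
    simp only [aBuild, bBuild]
    exact ih _ _ _

theorem dictStep (adj : PySem.Dict Int (List Int)) (cnt : PySem.Dict (Int × Int) Int)
    (a b : Int) (h : ∀ x u, cnt.getD (x, u) 0 = ((adj.getD x []).count u : Int)) :
    ∀ x u, (cnt.insert (a, b) (cnt.getD (a, b) 0 + 1)).getD (x, u) 0
      = (((adj.insert a (adj.getD a [] ++ [b])).getD x []).count u : Int) := by
  intro x u
  by_cases hx : x = a
  · subst hx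
    rw [PySem.Dict.getD_insert_self]
    by_cases hu : u = b
    · subst hu
      rw [PySem.Dict.getD_insert_self, h x u]
      simp [List.count_append]
    · rw [PySem.Dict.getD_insert, if_neg (show ¬((x, u) = (x, b)) by simp [hu]), h x u]
      simp [List.count_append, Ne.symm hu]
  · rw [PySem.Dict.getD_insert, if_neg (show ¬((x, u) = (a, b)) by simp [hx]),
      PySem.Dict.getD_insert, if_neg hx]
    exact h x u

theorem bBuild_cnt (ds : List (Int × Int)) :
    ∀ (adj : PySem.Dict Int (List Int)) (cnt : PySem.Dict (Int × Int) Int)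
      (deg : PySem.Dict Int Int),
    (∀ x u, cnt.getD (x, u) 0 = ((adj.getD x []).count u : Int)) →
    ∀ x u, ((bBuild ds adj cnt deg).2.1).getD (x, u) 0
      = ((((bBuild ds adj cnt deg).1).getD x []).count u : Int) := by
  induction ds with
  | nil => intro adj cnt deg h; exact h
  | cons d rest ih =>
    rcases d with ⟨l, r⟩
    intro adj cnt deg h
    simp only [bBuild]
    exact ih _ _ _ (dictStep _ _ r l (dictStep _ _ l r h))

theorem bWalk_head (fuel : Nat) (adj : PySem.Dict Int (List Int))
    (cnt pend : PySem.Dict (Int × Int) Int) (u : Int) :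
    ∃ t, (bWalk fuel adj cnt pend u).1 = u :: t := by
  rw [bWalk]
  rcases hp : bPop u (adj.getD u []) cnt pend with ⟨r, l', c', p'⟩
  cases r with
  | none => exact ⟨[], rfl⟩
  | some v =>
    cases fuel with
    | zero => exact ⟨[], rfl⟩
    | succ f => exact ⟨_, rfl⟩

-- walk batching: running bLoop from a stack with top v equals extracting the whole
-- maximal greedy walk at v first and continuing with it pushed on the stack
theorem walk_eq (fuel : Nat) :
    ∀ (adj : PySem.Dict Int (List Int)) (cnt pend : PySem.Dict (Int × Int) Int)
      (v : Int) (tail path : List Int),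
    bLoop fuel adj cnt pend (v :: tail) path =
      bLoop (bWalk fuel adj cnt pend v).2.1 (bWalk fuel adj cnt pend v).2.2.1
        (bWalk fuel adj cnt pend v).2.2.2.1 (bWalk fuel adj cnt pend v).2.2.2.2
        ((bWalk fuel adj cnt pend v).1.reverse ++ tail) path := by
  induction fuel with
  | zero =>
    intro adj cnt pend v tail path
    rw [bWalk]
    rcases hp : bPop v (adj.getD v []) cnt pend with ⟨r, l', c', p'⟩
    cases r <;> rfl
  | succ f ih =>
    intro adj cnt pend v tail path
    rw [bWalk]
    rcases hp : bPop v (adj.getD v []) cnt pend with ⟨r, l', c', p'⟩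
    cases r with
    | none =>
      -- the stuck case: re-running bPop on the emptied list changes nothing
      have hl' : l' = [] := by
        have := bPop_none_nil v (adj.getD v []) cnt pend
        rw [hp] at this; exact this rfl
      subst hl'
      simp only [bLoop, hp, List.reverse_cons, List.reverse_nil, List.nil_append,
        List.cons_append]
      have hg : ((adj.insert v []).getD v []) = [] := by rw [PySem.Dict.getD_insert_self]
      rw [hg, bPop_nil]
      simp only [PySem.Dict.insert_insert_self]
    | some nb =>
      simp only [bLoop, hp]
      rw [ih]
      simp only [List.reverse_cons, List.append_assoc, List.cons_append, List.nil_append]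

-- the zipper correspondence: bLoop on the stack/path zipper of `circuit` at scan
-- position i computes the reverse of the spliced circuit bOuter produces
theorem main_eq (fuel : Nat) :
    ∀ (adj : PySem.Dict Int (List Int)) (cnt pend : PySem.Dict (Int × Int) Int)
      (circuit : List Int) (i : Int), -1 ≤ i → i < circuit.length →
    bLoop fuel adj cnt pend ((circuit.take (i + 1).toNat).reverse)
        ((circuit.drop (i + 1).toNat).reverse)
      = (bOuter fuel adj cnt pend circuit i).reverse := by
  induction fuel using Nat.strong_induction_on with
  | _ fuel ih =>
    intro adj cnt pend circuit i hlo hhi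
    by_cases hneg : i < 0
    · have : i = -1 := by omega
      subst this
      rw [bOuter, if_pos (by norm_num)]
      simp only [show ((-1 : Int) + 1).toNat = 0 by rfl, List.take_zero, List.drop_zero,
        List.reverse_nil]
      cases fuel <;> rfl
    · push_neg at hneg
      have hidx : (i + 1).toNat = i.toNat + 1 := by omega
      have hlt : i.toNat < circuit.length := by omega
      have hu : PySem.List.pyGetD circuit i 0 = circuit[i.toNat] :=
        PySem.List.pyGetD_eq_getElem circuit 0 hneg hhi
      set u := circuit[i.toNat] with hu_def
      have htake : circuit.take (i + 1).toNat = circuit.take i.toNat ++ [u] := by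
        rw [hidx, List.take_succ, List.getElem?_eq_getElem hlt]
        simp [hu_def]
      have hstack : (circuit.take (i + 1).toNat).reverse
          = u :: (circuit.take i.toNat).reverse := by
        rw [htake]; simp
      rw [hstack, walk_eq]
      rw [bOuter, if_neg (by omega)]
      simp only [hu]
      rcases hw : bWalk fuel adj cnt pend u with ⟨w, r, adj', cnt', pend'⟩
      simp only [hw]
      by_cases hlen : 1 < w.length
      · -- splice branch
        obtain ⟨t, ht⟩ := bWalk_head fuel adj cnt pend u
        rw [hw] at ht
        dsimp only at ht
        subst ht
        have htne : t ≠ [] := by rintro rfl; simp at hlen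
        have hr_lt : r < fuel := by
          have := bWalk_fuel_lt fuel adj cnt pend u
          rw [hw] at this; exact this hlen
        rw [dif_pos hlen]
        have hlen' : 0 < t.length := List.length_pos_iff.mpr htne
        set circuit' := circuit.take (i + 1).toNat ++ (u :: t).tail ++ circuit.drop (i + 1).toNat
          with hc'
        have hwt : (u :: t).tail = t := rfl
        have hi' : i + ((u :: t).length : Int) - 1 = i + t.length := by
          simp; omega
        have hA : (circuit.take (i+1).toNat).length = (i+1).toNat := by
          simp [List.length_take]; omega
        have hB : (circuit.drop (i+1).toNat).length = circuit.length - (i+1).toNat := by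
          simp [List.length_drop]
        have hbounds₁ : (-1 : Int) ≤ i + t.length := by omega
        have hbounds₂ : i + (t.length : Int) < circuit'.length := by
          rw [hc']
          simp only [List.length_append, hwt, hA, hB]
          omega
        have hIH := ih r hr_lt adj' cnt' pend' circuit' (i + t.length) hbounds₁ hbounds₂
        rw [hi', ← hIH]
        have hn : ((i + (t.length:Int)) + 1).toNat
            = (circuit.take (i+1).toNat).length + t.length := by
          rw [hA]; omega
        have htake' : circuit'.take ((i + t.length) + 1).toNat
            = circuit.take (i + 1).toNat ++ t := by
          rw [hc', hwt, hn]
          simp [List.append_assoc, List.take_append]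
        have hdrop' : circuit'.drop ((i + t.length) + 1).toNat
            = circuit.drop (i + 1).toNat := by
          rw [hc', hwt, hn]
          simp [List.append_assoc, List.drop_append]
        rw [htake', hdrop']
        congr 1
        rw [htake]
        simp
      · -- pop branch: the walk found nothing, w = [u]
        rw [dif_neg hlen]
        -- unfold the walk to see which case produced w = [u]
        rw [bWalk] at hw
        rcases hp : bPop u (adj.getD u []) cnt pend with ⟨rr, l', c', p'⟩
        rw [hp] at hw
        cases rr with
        | some v =>
          cases fuel with
          | zero =>
            -- fuel exhausted mid-walk: r = 0, both sides keep the current suffix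
            simp only [Prod.mk.injEq] at hw
            obtain ⟨rfl, rfl, rfl, rfl, rfl⟩ := hw
            rfl
          | succ f =>
            -- impossible: the walk would have taken the edge, so w had length ≥ 2
            exfalso
            have hw1 : w = u :: (bWalk f (adj.insert u l') c'
                (p'.insert (v, u) (p'.getD (v, u) 0 + 1)) v).1 := by
              have := congrArg Prod.fst hw
              simpa using this.symm
            obtain ⟨t', ht'⟩ := bWalk_head f (adj.insert u l') c'
              (p'.insert (v, u) (p'.getD (v, u) 0 + 1)) v
            exact hlen (by rw [hw1, ht']; simp)
        | none =>
          have hl' : l' = [] := by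
            have := bPop_none_nil u (adj.getD u []) cnt pend
            rw [hp] at this; exact this rfl
          subst hl'
          simp only [Prod.mk.injEq] at hw
          obtain ⟨rfl, rfl, rfl, rfl, rfl⟩ := hw
          cases fuel with
          | zero => rfl
          | succ f' =>
            -- bLoop pops u: its adjacency is empty now
            have hg : ((adj.insert u []).getD u []) = [] := PySem.Dict.getD_insert_self ..
            simp only [List.reverse_cons, List.reverse_nil, List.nil_append, List.cons_append,
              List.nil_append, bLoop, hg, bPop_nil]
            rw [PySem.Dict.insert_insert_self]
            have hb₁ : (-1:Int) ≤ i - 1 := by omega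
            have hb₂ : i - 1 < (circuit.length : Int) := by omega
            have hIH := ih f' (by omega) (adj.insert u []) c' p' circuit (i - 1) hb₁ hb₂
            have htk : ((i - 1) + 1).toNat = i.toNat := by omega
            have hdr : circuit.drop i.toNat = u :: circuit.drop (i.toNat + 1) :=
              (List.drop_eq_getElem_cons hlt).trans rfl
            rw [dif_neg (Nat.succ_ne_zero f'), Nat.add_sub_cancel]
            rw [htk] at hIH
            have hpath' : (circuit.drop (i + 1).toNat).reverse ++ [u]
                = (circuit.drop i.toNat).reverse := by
              rw [hdr, hidx]; simp
            rw [hpath']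
            exact hIH

theorem zip_aux (l : List Int) :
    (List.range (l.length - 1)).map (fun k => (l.getD k 0, l.getD (k + 1) 0)) = l.zip l.tail := by
  induction l with
  | nil => rfl
  | cons a t iht =>
    cases t with
    | nil => rfl
    | cons b t' =>
      have hlen : (a :: b :: t').length - 1 = ((b :: t').length - 1) + 1 := by
        simp
      rw [hlen, List.range_succ_eq_map, List.map_cons, List.map_map]
      have hmap : ((fun k => ((a :: b :: t').getD k 0, (a :: b :: t').getD (k + 1) 0)) ∘ Nat.succ)
          = (fun k => ((b :: t').getD k 0, (b :: t').getD (k + 1) 0)) := by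
        funext k
        simp
      rw [hmap, iht]
      rfl

theorem zip_pairs (l : List Int) :
    (PySem.List.pyRange 0 ((l.length : Int) - 1) 1).map
      (fun i => (PySem.List.pyGetD l i 0, PySem.List.pyGetD l (i + 1) 0))
    = l.zip l.tail := by
  rw [PySem.List.pyRange_one, List.map_map]
  have hlen : (((l.length : Int) - 1) - 0).toNat = l.length - 1 := by omega
  rw [hlen]
  rw [← zip_aux l]
  refine List.map_congr_left (fun k hk => ?_)
  simp only [Function.comp_apply, zero_add]
  have h1 : ((k : Int) + 1) = ((k + 1 : Nat) : Int) := by push_cast; ring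
  rw [h1, PySem.List.pyGetD_natCast, PySem.List.pyGetD_natCast]

-- ===== VERDICT =====
theorem can_chain_spec : Claim_equal_can_chain := by
  intro ds _
  show can_chain ds = can_chain_alt ds
  simp only [can_chain, can_chain_alt]
  by_cases hnil : ds = []
  · rw [if_pos hnil, if_pos hnil]
  · rw [if_neg hnil, if_neg hnil]
    have hbuild := build_eq ds PySem.Dict.empty PySem.Dict.empty PySem.Dict.empty
    have h1 : (aBuild ds PySem.Dict.empty PySem.Dict.empty).1
        = (bBuild ds PySem.Dict.empty PySem.Dict.empty PySem.Dict.empty).1 := by rw [hbuild]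
    have h2 : (aBuild ds PySem.Dict.empty PySem.Dict.empty).2
        = (bBuild ds PySem.Dict.empty PySem.Dict.empty PySem.Dict.empty).2.2 := by rw [hbuild]
    rw [h1, h2]
    set F := 2 * ds.length + 1 with hF
    set B := bBuild ds PySem.Dict.empty PySem.Dict.empty PySem.Dict.empty with hB
    set s := (ds.headD (0, 0)).1 with hs
    rcases hw : bWalk F B.1 B.2.1 PySem.Dict.empty s with ⟨w, r, adj', cnt', pend'⟩
    have hpath : aLoop F B.1 [s] [] = (bOuter r adj' cnt' pend' w ((w.length : Int) - 1)).reverse := by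
      have hab : aLoop F B.1 [s] [] = bLoop F B.1 B.2.1 PySem.Dict.empty [s] [] := by
        refine loop_eq _ _ _ _ _ _ _ ?_ ?_ ?_
        · intro x
          refine (tlF_zero _ _ (fun u => ?_)).symm
          unfold pendF
          rw [PySem.Dict.getD_empty]
        · exact bBuild_cnt ds _ _ _
            (fun x u => by rw [PySem.Dict.getD_empty, PySem.Dict.getD_empty]; rfl)
        · intro k; rw [PySem.Dict.getD_empty]
      rw [hab, walk_eq, hw]
      dsimp only
      have hwne : w ≠ [] := by
        obtain ⟨t, ht⟩ := bWalk_head F B.1 B.2.1 PySem.Dict.empty s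
        rw [hw] at ht
        simp only at ht
        rw [ht]; simp
      have hlo : (-1 : Int) ≤ (w.length : Int) - 1 := by
        have := List.length_pos_iff.mpr hwne; omega
      have hhi : (w.length : Int) - 1 < (w.length : Int) := by omega
      have hIH := main_eq r adj' cnt' pend' w ((w.length : Int) - 1) hlo hhi
      have htk : (((w.length : Int) - 1) + 1).toNat = w.length := by omega
      rw [htk] at hIH
      simp only [List.take_of_length_le (le_refl _), List.drop_of_length_le (le_refl _),
        List.reverse_nil] at hIH
      rw [List.append_nil]
      exact hIH
    rw [hpath]
    dsimp only
    split_ifs with hpar hcond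
    · rfl
    · rfl
    · rw [PySem.List.slice_from_one]
      exact congrArg some (zip_pairs _)
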